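-- pv_equiv track=rewrite | github.com/VijaySreekar/Wandrix-Live | backend/app/services/providers/iata_lookup.py | _match_flight_gateway_alias
-- ===== SOURCE A (Python) =====
-- FLIGHT_GATEWAY_ALIASES: dict[str, tuple[str, str, str]] = {
--     "kyoto": ("OSA", "Osaka gateway", "Osaka/Kansai or Itami"),
--     "kyto": ("OSA", "Osaka gateway", "Osaka/Kansai or Itami"),
--     "amalfi coast": ("NAP", "Naples gateway", "Naples"),
--     "positano": ("NAP", "Naples gateway", "Naples"),
--     "lake como": ("MIL", "Milan gateway", "Milan"),
--     "cinque terre": ("PSA", "Pisa gateway", "Pisa"),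
--     "interlaken": ("ZRH", "Zurich gateway", "Zurich"),
--     "st moritz": ("ZRH", "Zurich gateway", "Zurich"),
--     "saint moritz": ("ZRH", "Zurich gateway", "Zurich"),
--     "banff": ("YYC", "Calgary gateway", "Calgary"),
--     "tulum": ("CUN", "Cancun gateway", "Cancun"),
-- }
--
-- def _match_flight_gateway_alias(keyword: str) -> tuple[str, str, str] | None:
--     normalized_keyword = _normalize_location_key(keyword)
--     direct_match = FLIGHT_GATEWAY_ALIASES.get(normalized_keyword)
--     if direct_match:
--         return direct_match
--
--     for alias, gateway in FLIGHT_GATEWAY_ALIASES.items():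
--         if normalized_keyword.startswith(f"{alias} "):
--             return gateway
--     return None
--
-- def _normalize_location_key(keyword: str) -> str:
--     normalized = keyword.lower()
--     for character in [",", ".", "(", ")", "/", "-"]:
--         normalized = normalized.replace(character, " ")
--     return " ".join(normalized.split())
-- ===== SOURCE B (Python) =====
-- # B: instead of rebuilding a normalized string and scanning every alias with a
-- # startswith test, tokenize once and dispatch through a depth-2 token index
-- # (first token -> gateway, (first, second) tokens -> gateway). Correct because
-- # no alias's token list is a prefix of another alias's token list, so at most
-- # one alias can match any keyword and the scan order of A never matters.
--
-- _GATEWAYS_BY_FIRST_TOKEN: dict[str, tuple[str, str, str]] = {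
--     "kyoto": ("OSA", "Osaka gateway", "Osaka/Kansai or Itami"),
--     "kyto": ("OSA", "Osaka gateway", "Osaka/Kansai or Itami"),
--     "positano": ("NAP", "Naples gateway", "Naples"),
--     "interlaken": ("ZRH", "Zurich gateway", "Zurich"),
--     "banff": ("YYC", "Calgary gateway", "Calgary"),
--     "tulum": ("CUN", "Cancun gateway", "Cancun"),
-- }
--
-- _GATEWAYS_BY_FIRST_TWO_TOKENS: dict[tuple[str, str], tuple[str, str, str]] = {
--     ("amalfi", "coast"): ("NAP", "Naples gateway", "Naples"),
--     ("lake", "como"): ("MIL", "Milan gateway", "Milan"),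
--     ("cinque", "terre"): ("PSA", "Pisa gateway", "Pisa"),
--     ("st", "moritz"): ("ZRH", "Zurich gateway", "Zurich"),
--     ("saint", "moritz"): ("ZRH", "Zurich gateway", "Zurich"),
-- }
--
--
-- def _location_tokens(keyword: str) -> list[str]:
--     lowered = keyword.lower()
--     for character in [",", ".", "(", ")", "/", "-"]:
--         lowered = lowered.replace(character, " ")
--     return lowered.split()
--
--
-- def _match_flight_gateway_alias(keyword: str) -> tuple[str, str, str] | None:
--     tokens = _location_tokens(keyword)
--     if not tokens:
--         return None
--     hit = _GATEWAYS_BY_FIRST_TOKEN.get(tokens[0])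
--     if hit is not None:
--         return hit
--     if len(tokens) >= 2:
--         return _GATEWAYS_BY_FIRST_TWO_TOKENS.get((tokens[0], tokens[1]))
--     return None
-- ===== Notes on version B (the rewrite author's own statement) =====
-- stated objective: alternative
-- what changed: B drops A's rebuild-the-normalized-string + linear startswith scan over the alias dict and instead tokenizes once and dispatches through a depth-2 token index (one dict keyed by the first token, one keyed by the first two tokens); correct because no alias's token list is a prefix of another alias's, so at most one alias can ever match.
import Mathlib
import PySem

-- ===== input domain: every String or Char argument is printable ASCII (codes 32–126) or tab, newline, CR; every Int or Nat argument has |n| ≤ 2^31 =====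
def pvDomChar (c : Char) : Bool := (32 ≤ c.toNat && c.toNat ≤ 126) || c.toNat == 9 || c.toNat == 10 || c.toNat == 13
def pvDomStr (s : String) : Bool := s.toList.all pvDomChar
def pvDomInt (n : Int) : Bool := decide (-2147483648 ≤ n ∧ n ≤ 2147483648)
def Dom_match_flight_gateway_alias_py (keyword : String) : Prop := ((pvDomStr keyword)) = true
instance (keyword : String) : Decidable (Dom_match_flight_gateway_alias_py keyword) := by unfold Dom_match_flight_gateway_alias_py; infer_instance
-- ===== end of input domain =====

-- B replaces A's normalized-string rebuild plus linear startswith scan over the alias dict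
-- by a one-pass tokenization and a depth-2 token index (first token, then first two tokens);
-- objective: alternative (same cost class on this fixed table).

-- ===== PORT A =====
-- module constant FLIGHT_GATEWAY_ALIASES (keys as char lists)
def pvGateways : List (List Char × (String × String × String)) :=
  [ ("kyoto".toList, ("OSA", "Osaka gateway", "Osaka/Kansai or Itami")),
    ("kyto".toList, ("OSA", "Osaka gateway", "Osaka/Kansai or Itami")),
    ("amalfi coast".toList, ("NAP", "Naples gateway", "Naples")),
    ("positano".toList, ("NAP", "Naples gateway", "Naples")),
    ("lake como".toList, ("MIL", "Milan gateway", "Milan")),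
    ("cinque terre".toList, ("PSA", "Pisa gateway", "Pisa")),
    ("interlaken".toList, ("ZRH", "Zurich gateway", "Zurich")),
    ("st moritz".toList, ("ZRH", "Zurich gateway", "Zurich")),
    ("saint moritz".toList, ("ZRH", "Zurich gateway", "Zurich")),
    ("banff".toList, ("YYC", "Calgary gateway", "Calgary")),
    ("tulum".toList, ("CUN", "Cancun gateway", "Cancun")) ]

def pvAliasDict : PySem.Dict (List Char) (String × String × String) := PySem.Dict.mk pvGateways

-- module helper _normalize_location_key
def pvNormalize (keyword : String) : List Char :=
  let lowered := PySem.Chars.lower keyword.toList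
  let replaced := [',', '.', '(', ')', '/', '-'].foldl
    (fun acc c => PySem.Chars.replace acc [c] [' ']) lowered
  PySem.Chars.join [' '] (PySem.Chars.split₀ replaced)

-- A's for-loop over FLIGHT_GATEWAY_ALIASES.items() with startswith(f"{alias} ")
def pvScanAliasesA (nk : List Char) : List (List Char × (String × String × String)) → Option (String × String × String)
  | [] => none
  | (al, gw) :: rest =>
    if PySem.Chars.startswith nk (al ++ [' ']) then some gw else pvScanAliasesA nk rest

def match_flight_gateway_alias_py (keyword : String) : Option (String × String × String) :=
  let nk := pvNormalize keyword
  match PySem.Dict.get? pvAliasDict nk with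
  | some g => some g
  | none => pvScanAliasesA nk pvGateways

-- ===== PORT B =====
-- B's module constant _GATEWAYS_BY_FIRST_TOKEN
def pvOneTok : PySem.Dict (List Char) (String × String × String) := PySem.Dict.mk
  [ ("kyoto".toList, ("OSA", "Osaka gateway", "Osaka/Kansai or Itami")),
    ("kyto".toList, ("OSA", "Osaka gateway", "Osaka/Kansai or Itami")),
    ("positano".toList, ("NAP", "Naples gateway", "Naples")),
    ("interlaken".toList, ("ZRH", "Zurich gateway", "Zurich")),
    ("banff".toList, ("YYC", "Calgary gateway", "Calgary")),
    ("tulum".toList, ("CUN", "Cancun gateway", "Cancun")) ]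

-- B's module constant _GATEWAYS_BY_FIRST_TWO_TOKENS
def pvTwoTok : PySem.Dict (List Char × List Char) (String × String × String) := PySem.Dict.mk
  [ (("amalfi".toList, "coast".toList), ("NAP", "Naples gateway", "Naples")),
    (("lake".toList, "como".toList), ("MIL", "Milan gateway", "Milan")),
    (("cinque".toList, "terre".toList), ("PSA", "Pisa gateway", "Pisa")),
    (("st".toList, "moritz".toList), ("ZRH", "Zurich gateway", "Zurich")),
    (("saint".toList, "moritz".toList), ("ZRH", "Zurich gateway", "Zurich")) ]

-- B's helper _location_tokens (lower, replace separators, split on whitespace; no re-join)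
def pvTokensB (keyword : String) : List (List Char) :=
  let lowered := PySem.Chars.lower keyword.toList
  let replaced := [',', '.', '(', ')', '/', '-'].foldl
    (fun acc c => PySem.Chars.replace acc [c] [' ']) lowered
  PySem.Chars.split₀ replaced

def match_flight_gateway_alias_py_alt (keyword : String) : Option (String × String × String) :=
  match pvTokensB keyword with
  | [] => none
  | t0 :: rest =>
    match PySem.Dict.get? pvOneTok t0 with
    | some g => some g
    | none =>
      match rest with
      | [] => none
      | t1 :: _ => PySem.Dict.get? pvTwoTok (t0, t1)

-- ===== PRECONDITION & SPEC =====
def Spec_match_flight_gateway_alias_py (keyword : String) (out : Option (String × String × String)) : Prop := out = match_flight_gateway_alias_py_alt keyword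
instance (keyword : String) (out : Option (String × String × String)) : Decidable (Spec_match_flight_gateway_alias_py keyword out) := by unfold Spec_match_flight_gateway_alias_py; infer_instance

-- ===== CLAIM (what is proved, stated in full; the proofs are below) =====
def Claim_equal_match_flight_gateway_alias_py : Prop := ∀ (keyword : String), Dom_match_flight_gateway_alias_py keyword → Spec_match_flight_gateway_alias_py keyword (match_flight_gateway_alias_py keyword)

-- ===== LEMMAS AND PROOFS =====

-- a word: nonempty, no whitespace characters
def pvWord (w : List Char) : Prop := w ≠ [] ∧ ∀ c ∈ w, PySem.Chars.isspace c = false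

def pvNoSpace (w : List Char) : Prop := ∀ c ∈ w, PySem.Chars.isspace c = false

-- gateway tuples, short names for the proofs
def pvOSA : String × String × String := ("OSA", "Osaka gateway", "Osaka/Kansai or Itami")
def pvNAP : String × String × String := ("NAP", "Naples gateway", "Naples")
def pvMIL : String × String × String := ("MIL", "Milan gateway", "Milan")
def pvPSA : String × String × String := ("PSA", "Pisa gateway", "Pisa")
def pvZRH : String × String × String := ("ZRH", "Zurich gateway", "Zurich")
def pvYYC : String × String × String := ("YYC", "Calgary gateway", "Calgary")
def pvCUN : String × String × String := ("CUN", "Cancun gateway", "Cancun")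

-- the two dispatch chains both programs reduce to
def pvC1 (t0 : List Char) : Option (String × String × String) :=
  if t0 = "kyoto".toList then some pvOSA
  else if t0 = "kyto".toList then some pvOSA
  else if t0 = "positano".toList then some pvNAP
  else if t0 = "interlaken".toList then some pvZRH
  else if t0 = "banff".toList then some pvYYC
  else if t0 = "tulum".toList then some pvCUN
  else none

def pvC2 (t0 u : List Char) : Option (String × String × String) :=
  if t0 = "amalfi".toList ∧ u = "coast".toList then some pvNAP
  else if t0 = "lake".toList ∧ u = "como".toList then some pvMIL
  else if t0 = "cinque".toList ∧ u = "terre".toList then some pvPSA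
  else if t0 = "st".toList ∧ u = "moritz".toList then some pvZRH
  else if t0 = "saint".toList ∧ u = "moritz".toList then some pvZRH
  else none

-- ---------- split/join word machinery ----------

theorem pv_go_acc (s : List Char) : ∀ cur acc, PySem.Chars.split₀.go s cur acc = acc.reverse ++ PySem.Chars.split₀.go s cur [] := by
  induction s with
  | nil => intro cur acc; simp [PySem.Chars.split₀.go]; split <;> simp
  | cons c rest ih =>
    intro cur acc
    simp only [PySem.Chars.split₀.go]
    split
    · split
      · exact ih [] acc
      · rw [ih [] (cur.reverse :: acc), ih [] [cur.reverse]]; simp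
    · exact ih (c :: cur) acc

theorem pv_go_word (w : List Char) (hw : ∀ c ∈ w, PySem.Chars.isspace c = false) :
    ∀ rest cur acc, PySem.Chars.split₀.go (w ++ rest) cur acc = PySem.Chars.split₀.go rest (w.reverse ++ cur) acc := by
  induction w with
  | nil => intro rest cur acc; simp
  | cons c w' ih =>
    intro rest cur acc
    have hc : PySem.Chars.isspace c = false := hw c (by simp)
    simp only [List.cons_append, PySem.Chars.split₀.go, hc]
    rw [ih (fun d hd => hw d (by simp [hd])) rest (c :: cur) acc]
    simp

theorem pv_go_words (s : List Char) : ∀ cur acc,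
    (∀ c ∈ cur, PySem.Chars.isspace c = false) → (∀ w ∈ acc, pvWord w) →
    ∀ w ∈ PySem.Chars.split₀.go s cur acc, pvWord w := by
  induction s with
  | nil =>
    intro cur acc hcur hacc w hw
    simp only [PySem.Chars.split₀.go] at hw
    split at hw
    · exact hacc w (by simpa using hw)
    · rename_i hne
      simp at hw
      rcases hw with hw | hw
      · exact hacc w hw
      · subst hw
        refine ⟨by simpa [List.isEmpty_iff] using hne, fun c hc => hcur c (by simpa using hc)⟩
  | cons c rest ih =>
    intro cur acc hcur hacc w hw
    simp only [PySem.Chars.split₀.go] at hw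
    split at hw
    · split at hw
      · exact ih [] acc (by simp) hacc w hw
      · rename_i hne
        refine ih [] (cur.reverse :: acc) (by simp) ?_ w hw
        intro v hv
        rcases List.mem_cons.1 hv with hv | hv
        · subst hv
          exact ⟨by simpa [List.isEmpty_iff] using hne, fun d hd => hcur d (by simpa using hd)⟩
        · exact hacc v hv
    · rename_i hc
      refine ih (c :: cur) acc ?_ hacc w hw
      intro d hd
      rcases List.mem_cons.1 hd with hd | hd
      · subst hd; simpa using hc
      · exact hcur d hd

theorem pv_split₀_words (s : List Char) : ∀ w ∈ PySem.Chars.split₀ s, pvWord w :=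
  pv_go_words s [] [] (by simp) (by simp)

theorem pv_join_singleton (w : List Char) : PySem.Chars.join [' '] [w] = w := by
  simp [PySem.Chars.join, List.intercalate]

theorem pv_join_cons₂ (w v : List Char) (vs : List (List Char)) :
    PySem.Chars.join [' '] (w :: v :: vs) = w ++ ' ' :: PySem.Chars.join [' '] (v :: vs) := by
  simp [PySem.Chars.join, List.intercalate, List.intersperse]

theorem pv_isspace_space : PySem.Chars.isspace ' ' = true := by decide

-- ---------- no-space facts ----------

theorem pv_nospace_not_mem {w : List Char} (h : pvNoSpace w) : ' ' ∉ w := by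
  intro hm
  have := h ' ' hm
  simp [pv_isspace_space] at this

theorem pv_ne_append_space {t0 : List Char} (h : pvNoSpace t0) (p y : List Char) :
    t0 ≠ p ++ ' ' :: y := by
  intro he
  exact pv_nospace_not_mem h (by rw [he]; simp)

theorem pv_space_split {a t : List Char} (ha : pvNoSpace a) (ht : pvNoSpace t) (x y : List Char) :
    a ++ ' ' :: x = t ++ ' ' :: y ↔ a = t ∧ x = y := by
  constructor
  · intro h
    induction a generalizing t with
    | nil =>
      cases t with
      | nil => simpa using h
      | cons c t' =>
        exfalso
        simp at h
        have := ht c (by simp)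
        rw [← h.1] at this
        simp [pv_isspace_space] at this
    | cons c a' ih =>
      cases t with
      | nil =>
        exfalso
        simp at h
        have := ha c (by simp)
        rw [h.1] at this
        simp [pv_isspace_space] at this
      | cons d t' =>
        simp at h
        obtain ⟨h1, h2⟩ := h
        obtain ⟨h3, h4⟩ := ih (fun c hc => ha c (by simp [hc])) (fun c hc => ht c (by simp [hc])) h2
        exact ⟨by rw [h1, h3], h4⟩
  · rintro ⟨rfl, rfl⟩; rfl

theorem pv_startswith_word_false {t0 : List Char} (h : pvNoSpace t0) (p : List Char) :
    PySem.Chars.startswith t0 (p ++ [' ']) = false := by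
  rw [Bool.eq_false_iff]
  intro hs
  have : (p ++ [' ']) <+: t0 := List.isPrefixOf_iff_prefix.1 hs
  obtain ⟨r, hr⟩ := this
  exact pv_ne_append_space h p r (by rw [← hr]; simp)

-- ---------- startswith on a joined token list ----------

theorem pv_go_join_gen (ws : List (List Char)) (hws : ∀ w ∈ ws, pvWord w) :
    ∀ tail acc, (tail = [] ∨ ∃ r, tail = ' ' :: r) →
    PySem.Chars.split₀.go (PySem.Chars.join [' '] ws ++ tail) [] acc
      = acc.reverse ++ ws ++ PySem.Chars.split₀.go tail [] [] := by
  induction ws with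
  | nil =>
    intro tail acc htail
    rcases htail with h | ⟨r, h⟩ <;> subst h
    · simp [PySem.Chars.join, List.intercalate, PySem.Chars.split₀.go]
    · simp only [PySem.Chars.join, List.intercalate, List.nil_append]
      rw [pv_go_acc]; simp
  | cons w ws' ih =>
    intro tail acc htail
    have hw := hws w (by simp)
    have hrev : w.reverse.isEmpty = false := by
      simp [List.isEmpty_iff]; exact hw.1
    cases ws' with
    | nil =>
      rw [pv_join_singleton, pv_go_word w hw.2 tail [] acc]
      rcases htail with h | ⟨r, h⟩ <;> subst h
      · simp [PySem.Chars.split₀.go, hrev]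
      · simp only [PySem.Chars.split₀.go, pv_isspace_space, hrev, if_true, if_false,
          Bool.false_eq_true, List.reverse_reverse, List.append_nil]
        rw [pv_go_acc]
        simp
    | cons v vs =>
      rw [pv_join_cons₂]
      have : (w ++ ' ' :: PySem.Chars.join [' '] (v :: vs)) ++ tail
           = w ++ (' ' :: (PySem.Chars.join [' '] (v :: vs) ++ tail)) := by simp
      rw [this, pv_go_word w hw.2 _ [] acc]
      simp only [PySem.Chars.split₀.go, pv_isspace_space, hrev, if_true, if_false,
        Bool.false_eq_true, List.reverse_reverse, List.append_nil]
      rw [ih (fun u hu => hws u (by simp [hu])) tail (w :: acc) htail]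
      simp

theorem pv_roundtrip (ws : List (List Char)) (hws : ∀ w ∈ ws, pvWord w) :
    PySem.Chars.split₀ (PySem.Chars.join [' '] ws) = ws := by
  have := pv_go_join_gen ws hws [] [] (Or.inl rfl)
  simpa [PySem.Chars.split₀, PySem.Chars.split₀.go] using this

theorem pv_join_append (ws ds : List (List Char)) (hws : ws ≠ []) (hds : ds ≠ []) :
    PySem.Chars.join [' '] (ws ++ ds) = PySem.Chars.join [' '] ws ++ (' ' :: PySem.Chars.join [' '] ds) := by
  induction ws with
  | nil => exact absurd rfl hws
  | cons w ws' ih =>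
    cases ws' with
    | nil =>
      cases ds with
      | nil => exact absurd rfl hds
      | cons d ds' => rw [List.singleton_append, pv_join_cons₂, pv_join_singleton]
    | cons v vs =>
      have h1 : (w :: v :: vs) ++ ds = w :: ((v :: vs) ++ ds) := rfl
      rw [h1]
      have h2 : (v :: vs) ++ ds = v :: (vs ++ ds) := rfl
      rw [h2, pv_join_cons₂, pv_join_cons₂]
      have := ih (by simp)
      rw [h2] at this
      rw [this]
      simp

theorem pv_split_of_join_space (ws : List (List Char)) (hws : ∀ w ∈ ws, pvWord w) (r : List Char) :
    PySem.Chars.split₀ (PySem.Chars.join [' '] ws ++ (' ' :: r)) = ws ++ PySem.Chars.split₀ r := by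
  have := pv_go_join_gen ws hws (' ' :: r) [] (Or.inr ⟨r, rfl⟩)
  simpa [PySem.Chars.split₀] using this

theorem pv_prefix_iff (ws ts : List (List Char)) (hne : ws ≠ [])
    (hws : ∀ w ∈ ws, pvWord w) (hts : ∀ w ∈ ts, pvWord w) :
    (PySem.Chars.join [' '] ws ++ [' ']) <+: PySem.Chars.join [' '] ts
      ↔ ws.length < ts.length ∧ ts.take ws.length = ws := by
  constructor
  · rintro ⟨r, hr⟩
    have hjoin : PySem.Chars.join [' '] ts = PySem.Chars.join [' '] ws ++ (' ' :: r) := by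
      rw [← hr]; simp
    have hts' : ts = ws ++ PySem.Chars.split₀ r := by
      rw [← pv_roundtrip ts hts, hjoin, pv_split_of_join_space ws hws r]
    have hsr : PySem.Chars.split₀ r ≠ [] := by
      intro h0
      rw [h0, List.append_nil] at hts'
      rw [hts'] at hjoin
      have := congrArg List.length hjoin
      simp at this
    constructor
    · rw [hts']
      have : 0 < (PySem.Chars.split₀ r).length := List.length_pos_iff.2 hsr
      simp
      omega
    · rw [hts', List.take_left]
  · rintro ⟨hlen, htake⟩
    have hts' : ts = ws ++ ts.drop ws.length := by
      conv_lhs => rw [← List.take_append_drop ws.length ts, htake]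
    have hd : ts.drop ws.length ≠ [] := by
      intro h0
      have := congrArg List.length hts'
      simp [h0] at this
      omega
    rw [hts', pv_join_append ws _ hne hd]
    exact ⟨PySem.Chars.join [' '] (ts.drop ws.length), by simp⟩

theorem pv_cond1 (t0 t1 : List Char) (rest : List (List Char))
    (hts : ∀ w ∈ t0 :: t1 :: rest, pvWord w) (a : List Char) (ha : pvWord a) :
    PySem.Chars.startswith (PySem.Chars.join [' '] (t0 :: t1 :: rest)) (a ++ [' '])
      = decide (t0 = a) := by
  have hiff : PySem.Chars.startswith (PySem.Chars.join [' '] (t0 :: t1 :: rest)) (a ++ [' ']) = true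
      ↔ t0 = a := by
    rw [PySem.Chars.startswith, ← pv_join_singleton a, List.isPrefixOf_iff_prefix,
      pv_prefix_iff [a] (t0 :: t1 :: rest) (by simp) (by simpa using ha) hts]
    simp
  apply Bool.eq_iff_iff.2
  simp [hiff]

theorem pv_cond2 (t0 t1 : List Char) (rest : List (List Char))
    (hts : ∀ w ∈ t0 :: t1 :: rest, pvWord w) (a b : List Char) (ha : pvWord a) (hb : pvWord b) :
    PySem.Chars.startswith (PySem.Chars.join [' '] (t0 :: t1 :: rest)) ((a ++ ' ' :: b) ++ [' '])
      = decide (rest ≠ [] ∧ t0 = a ∧ t1 = b) := by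
  have hj : a ++ ' ' :: b = PySem.Chars.join [' '] [a, b] := by
    rw [pv_join_cons₂, pv_join_singleton]
  have hiff : PySem.Chars.startswith (PySem.Chars.join [' '] (t0 :: t1 :: rest)) ((a ++ ' ' :: b) ++ [' ']) = true
      ↔ (rest ≠ [] ∧ t0 = a ∧ t1 = b) := by
    rw [PySem.Chars.startswith, hj, List.isPrefixOf_iff_prefix,
      pv_prefix_iff [a, b] (t0 :: t1 :: rest) (by simp) (by simp [ha, hb]) hts]
    constructor
    · rintro ⟨hlen, htake⟩
      simp at hlen htake
      exact ⟨by rw [← List.length_pos_iff]; omega, htake⟩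
    · rintro ⟨hrest, h1, h2⟩
      have : 0 < rest.length := List.length_pos_iff.2 hrest
      constructor
      · simp; omega
      · simp [h1, h2]
  apply Bool.eq_iff_iff.2
  simp only [List.append_assoc, List.cons_append] at hiff
  simp [hiff]

-- ---------- beq facts for the dict lookups ----------

theorem pv_beq_comm (x y : List Char) : (x == y) = decide (y = x) := by
  apply Bool.eq_iff_iff.2
  rw [beq_iff_eq, decide_eq_true_eq]
  exact eq_comm

theorem pv_beq_spacelit_false (a b t0 : List Char) (h : pvNoSpace t0) :
    ((a ++ ' ' :: b : List Char) == t0) = false := by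
  rw [Bool.eq_false_iff]
  intro he
  exact pv_ne_append_space h a b (by simpa [eq_comm] using (beq_iff_eq.1 he))

theorem pv_beq_nospacelit_false (lit t0 t1 : List Char) (h : pvNoSpace lit) :
    ((lit : List Char) == t0 ++ ' ' :: t1) = false := by
  rw [Bool.eq_false_iff]
  intro he
  exact pv_ne_append_space h t0 t1 (beq_iff_eq.1 he)

theorem pv_beq2 (a b t0 t1 : List Char) (ha : pvNoSpace a) (hb : pvNoSpace b) (h0 : pvNoSpace t0) :
    ((a ++ ' ' :: b : List Char) == t0 ++ ' ' :: t1) = decide (t0 = a ∧ t1 = b) := by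
  apply Bool.eq_iff_iff.2
  rw [beq_iff_eq, pv_space_split ha h0 b t1, decide_eq_true_eq]
  exact ⟨fun ⟨h1, h2⟩ => ⟨h1.symm, h2.symm⟩, fun ⟨h1, h2⟩ => ⟨h1.symm, h2.symm⟩⟩

theorem pv_beq_pair (a b t0 t1 : List Char) :
    (((a, b) : List Char × List Char) == (t0, t1)) = decide (t0 = a ∧ t1 = b) := by
  apply Bool.eq_iff_iff.2
  rw [beq_iff_eq, decide_eq_true_eq, Prod.ext_iff]
  exact ⟨fun ⟨h1, h2⟩ => ⟨h1.symm, h2.symm⟩, fun ⟨h1, h2⟩ => ⟨h1.symm, h2.symm⟩⟩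

-- the two-token alias literals split at their inner space
theorem pv_split_amalfi : ("amalfi coast".toList : List Char) = "amalfi".toList ++ ' ' :: "coast".toList := by decide
theorem pv_split_lake : ("lake como".toList : List Char) = "lake".toList ++ ' ' :: "como".toList := by decide
theorem pv_split_cinque : ("cinque terre".toList : List Char) = "cinque".toList ++ ' ' :: "terre".toList := by decide
theorem pv_split_st : ("st moritz".toList : List Char) = "st".toList ++ ' ' :: "moritz".toList := by decide
theorem pv_split_saint : ("saint moritz".toList : List Char) = "saint".toList ++ ' ' :: "moritz".toList := by decide

-- ---------- the four lookup/scan reductions ----------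

theorem pv_nospace_of_all {w : List Char} (h : w.all (fun c => !PySem.Chars.isspace c) = true) : pvNoSpace w := by
  intro c hc
  have := List.all_eq_true.1 h c hc
  simpa using this

theorem pv_word_of_all {w : List Char} (hne : w ≠ []) (h : w.all (fun c => !PySem.Chars.isspace c) = true) : pvWord w :=
  ⟨hne, pv_nospace_of_all h⟩

theorem pv_get1 (t0 : List Char) (h : pvNoSpace t0) :
    PySem.Dict.get? pvAliasDict t0 = pvC1 t0 := by
  have hb := fun a b => pv_beq_spacelit_false a b t0 h
  simp only [pvAliasDict, pvGateways, PySem.Dict.get?, pv_split_amalfi, pv_split_lake,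
    pv_split_cinque, pv_split_st, pv_split_saint, List.find?_cons, List.find?_nil]
  simp only [hb, pv_beq_comm, pvC1, pvOSA, pvNAP, pvZRH, pvYYC, pvCUN]
  split_ifs <;> simp_all

theorem pv_get2 (t0 u : List Char) (h0 : pvNoSpace t0) :
    PySem.Dict.get? pvAliasDict (t0 ++ ' ' :: u) = pvC2 t0 u := by
  simp only [pvAliasDict, pvGateways, PySem.Dict.get?, pv_split_amalfi, pv_split_lake,
    pv_split_cinque, pv_split_st, pv_split_saint, List.find?_cons, List.find?_nil]
  rw [pv_beq_nospacelit_false _ t0 u (pv_nospace_of_all (by decide)),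
    pv_beq_nospacelit_false _ t0 u (pv_nospace_of_all (by decide)),
    pv_beq2 _ _ _ _ (pv_nospace_of_all (by decide)) (pv_nospace_of_all (by decide)) h0,
    pv_beq_nospacelit_false _ t0 u (pv_nospace_of_all (by decide)),
    pv_beq2 _ _ _ _ (pv_nospace_of_all (by decide)) (pv_nospace_of_all (by decide)) h0,
    pv_beq2 _ _ _ _ (pv_nospace_of_all (by decide)) (pv_nospace_of_all (by decide)) h0,
    pv_beq_nospacelit_false _ t0 u (pv_nospace_of_all (by decide)),
    pv_beq2 _ _ _ _ (pv_nospace_of_all (by decide)) (pv_nospace_of_all (by decide)) h0,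
    pv_beq2 _ _ _ _ (pv_nospace_of_all (by decide)) (pv_nospace_of_all (by decide)) h0,
    pv_beq_nospacelit_false _ t0 u (pv_nospace_of_all (by decide)),
    pv_beq_nospacelit_false _ t0 u (pv_nospace_of_all (by decide))]
  simp only [pvC2, pvNAP, pvMIL, pvPSA, pvZRH]
  split_ifs <;> simp_all [← Bool.decide_and, -Bool.decide_and, -not_and]

theorem pv_one (t0 : List Char) : PySem.Dict.get? pvOneTok t0 = pvC1 t0 := by
  simp only [pvOneTok, PySem.Dict.get?, List.find?_cons, List.find?_nil, pv_beq_comm,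
    pvC1, pvOSA, pvNAP, pvZRH, pvYYC, pvCUN]
  split_ifs <;> simp_all

theorem pv_two (t0 t1 : List Char) : PySem.Dict.get? pvTwoTok (t0, t1) = pvC2 t0 t1 := by
  simp only [pvTwoTok, PySem.Dict.get?, List.find?_cons, List.find?_nil, pv_beq_pair,
    pvC2, pvNAP, pvMIL, pvPSA, pvZRH]
  split_ifs <;> simp_all [← Bool.decide_and, -Bool.decide_and, -not_and]

theorem pv_scan1 (t0 : List Char) (h : pvNoSpace t0) :
    pvScanAliasesA t0 pvGateways = none := by
  have hsw := fun p => pv_startswith_word_false h p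
  simp only [pvScanAliasesA, pvGateways, hsw]
  simp

theorem pv_scan2 (t0 t1 : List Char) (rest : List (List Char))
    (hts : ∀ w ∈ t0 :: t1 :: rest, pvWord w) :
    pvScanAliasesA (PySem.Chars.join [' '] (t0 :: t1 :: rest)) pvGateways
      = (if t0 = "kyoto".toList then some pvOSA
         else if t0 = "kyto".toList then some pvOSA
         else if rest ≠ [] ∧ t0 = "amalfi".toList ∧ t1 = "coast".toList then some pvNAP
         else if t0 = "positano".toList then some pvNAP
         else if rest ≠ [] ∧ t0 = "lake".toList ∧ t1 = "como".toList then some pvMIL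
         else if rest ≠ [] ∧ t0 = "cinque".toList ∧ t1 = "terre".toList then some pvPSA
         else if t0 = "interlaken".toList then some pvZRH
         else if rest ≠ [] ∧ t0 = "st".toList ∧ t1 = "moritz".toList then some pvZRH
         else if rest ≠ [] ∧ t0 = "saint".toList ∧ t1 = "moritz".toList then some pvZRH
         else if t0 = "banff".toList then some pvYYC
         else if t0 = "tulum".toList then some pvCUN
         else none) := by
  have c1 := fun (a : List Char) (ha : pvWord a) => pv_cond1 t0 t1 rest hts a ha
  have c2 := fun (a b : List Char) (ha : pvWord a) (hb : pvWord b) => pv_cond2 t0 t1 rest hts a b ha hb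
  simp only [pvScanAliasesA, pvGateways, pv_split_amalfi, pv_split_lake, pv_split_cinque,
    pv_split_st, pv_split_saint]
  rw [c1 _ (pv_word_of_all (by decide) (by decide)), c1 _ (pv_word_of_all (by decide) (by decide)),
    c2 _ _ (pv_word_of_all (by decide) (by decide)) (pv_word_of_all (by decide) (by decide)),
    c1 _ (pv_word_of_all (by decide) (by decide)),
    c2 _ _ (pv_word_of_all (by decide) (by decide)) (pv_word_of_all (by decide) (by decide)),
    c2 _ _ (pv_word_of_all (by decide) (by decide)) (pv_word_of_all (by decide) (by decide)),
    c1 _ (pv_word_of_all (by decide) (by decide)),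
    c2 _ _ (pv_word_of_all (by decide) (by decide)) (pv_word_of_all (by decide) (by decide)),
    c2 _ _ (pv_word_of_all (by decide) (by decide)) (pv_word_of_all (by decide) (by decide)),
    c1 _ (pv_word_of_all (by decide) (by decide)), c1 _ (pv_word_of_all (by decide) (by decide))]
  simp only [decide_eq_true_eq, pvOSA, pvNAP, pvMIL, pvPSA, pvZRH, pvYYC, pvCUN]

-- ---------- chain algebra: A's orders equal B's first-token-first order ----------

theorem pv_swap (t0 t1 : List Char) :
    (match pvC2 t0 t1 with | some g => some g | none => pvC1 t0)
      = (match pvC1 t0 with | some g => some g | none => pvC2 t0 t1) := by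
  by_cases h1 : t0 = ['k', 'y', 'o', 't', 'o']
  · subst h1; simp [pvC1, pvC2]
  by_cases h2 : t0 = ['k', 'y', 't', 'o']
  · subst h2; simp [pvC1, pvC2]
  by_cases h3 : t0 = ['p', 'o', 's', 'i', 't', 'a', 'n', 'o']
  · subst h3; simp [pvC1, pvC2]
  by_cases h4 : t0 = ['i', 'n', 't', 'e', 'r', 'l', 'a', 'k', 'e', 'n']
  · subst h4; simp [pvC1, pvC2]
  by_cases h5 : t0 = ['b', 'a', 'n', 'f', 'f']
  · subst h5; simp [pvC1, pvC2]
  by_cases h6 : t0 = ['t', 'u', 'l', 'u', 'm']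
  · subst h6; simp [pvC1, pvC2]
  have hC1 : pvC1 t0 = none := by simp [pvC1, h1, h2, h3, h4, h5, h6]
  rw [hC1]
  cases hx : pvC2 t0 t1 <;> rfl

theorem pv_mix (t0 t1 : List Char) :
    (if t0 = "kyoto".toList then some pvOSA
     else if t0 = "kyto".toList then some pvOSA
     else if t0 = "amalfi".toList ∧ t1 = "coast".toList then some pvNAP
     else if t0 = "positano".toList then some pvNAP
     else if t0 = "lake".toList ∧ t1 = "como".toList then some pvMIL
     else if t0 = "cinque".toList ∧ t1 = "terre".toList then some pvPSA
     else if t0 = "interlaken".toList then some pvZRH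
     else if t0 = "st".toList ∧ t1 = "moritz".toList then some pvZRH
     else if t0 = "saint".toList ∧ t1 = "moritz".toList then some pvZRH
     else if t0 = "banff".toList then some pvYYC
     else if t0 = "tulum".toList then some pvCUN
     else none)
      = (match pvC1 t0 with | some g => some g | none => pvC2 t0 t1) := by
  by_cases h1 : t0 = ['k', 'y', 'o', 't', 'o']
  · subst h1; simp [pvC1, pvC2]
  by_cases h2 : t0 = ['k', 'y', 't', 'o']
  · subst h2; simp [pvC1, pvC2]
  by_cases h3 : t0 = ['p', 'o', 's', 'i', 't', 'a', 'n', 'o']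
  · subst h3; simp [pvC1, pvC2]
  by_cases h4 : t0 = ['i', 'n', 't', 'e', 'r', 'l', 'a', 'k', 'e', 'n']
  · subst h4; simp [pvC1, pvC2]
  by_cases h5 : t0 = ['b', 'a', 'n', 'f', 'f']
  · subst h5; simp [pvC1, pvC2]
  by_cases h6 : t0 = ['t', 'u', 'l', 'u', 'm']
  · subst h6; simp [pvC1, pvC2]
  have hC1 : pvC1 t0 = none := by simp [pvC1, h1, h2, h3, h4, h5, h6]
  rw [hC1]
  simp [pvC2, h1, h2, h3, h4, h5, h6] <;> rfl

-- ---------- main token-level lemma ----------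

-- B's dispatch, as a function of the token list (proof-side helper)
def pvDispatch : List (List Char) → Option (String × String × String)
  | [] => none
  | [t0] => (match PySem.Dict.get? pvOneTok t0 with | some g => some g | none => none)
  | t0 :: t1 :: _ =>
    (match PySem.Dict.get? pvOneTok t0 with
     | some g => some g
     | none => PySem.Dict.get? pvTwoTok (t0, t1))

theorem pv_alt_eq (keyword : String) :
    match_flight_gateway_alias_py_alt keyword = pvDispatch (pvTokensB keyword) := by
  unfold match_flight_gateway_alias_py_alt
  rcases pvTokensB keyword with _ | ⟨t0, _ | ⟨t1, rest⟩⟩ <;> rfl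

theorem pv_main (ts : List (List Char)) (hts : ∀ w ∈ ts, pvWord w) :
    (match PySem.Dict.get? pvAliasDict (PySem.Chars.join [' '] ts) with
     | some g => some g
     | none => pvScanAliasesA (PySem.Chars.join [' '] ts) pvGateways)
      = pvDispatch ts := by
  rcases ts with _ | ⟨t0, _ | ⟨t1, rest⟩⟩
  · decide
  · have h0 : pvNoSpace t0 := (hts t0 (by simp)).2
    rw [pv_join_singleton, pv_get1 t0 h0, pv_scan1 t0 h0]
    simp only [pvDispatch, pv_one t0]
  · have h0 : pvNoSpace t0 := (hts t0 (by simp)).2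
    simp only [pvDispatch, pv_one t0, pv_two t0 t1]
    rcases rest with _ | ⟨r, rs⟩
    · rw [pv_scan2 t0 t1 [] hts, pv_join_cons₂, pv_join_singleton, pv_get2 t0 t1 h0]
      simp only [ne_eq, not_true_eq_false, false_and, if_false]
      exact pv_swap t0 t1
    · have hfalse : ∀ lit : List Char, pvNoSpace lit →
          ¬(t1 ++ ' ' :: PySem.Chars.join [' '] (r :: rs) = lit) := by
        intro lit hlit he
        exact pv_ne_append_space hlit t1 (PySem.Chars.join [' '] (r :: rs)) he.symm
      have hC2none : pvC2 t0 (t1 ++ ' ' :: PySem.Chars.join [' '] (r :: rs)) = none := by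
        simp [pvC2, hfalse ['c', 'o', 'a', 's', 't'] (pv_nospace_of_all (by decide)),
          hfalse ['c', 'o', 'm', 'o'] (pv_nospace_of_all (by decide)),
          hfalse ['t', 'e', 'r', 'r', 'e'] (pv_nospace_of_all (by decide)),
          hfalse ['m', 'o', 'r', 'i', 't', 'z'] (pv_nospace_of_all (by decide))]
      rw [pv_scan2 t0 t1 (r :: rs) hts, pv_join_cons₂, pv_join_cons₂,
        pv_get2 t0 (t1 ++ ' ' :: PySem.Chars.join [' '] (r :: rs)) h0, hC2none]
      simp only [ne_eq, reduceCtorEq, not_false_eq_true, true_and]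
      exact pv_mix t0 t1

theorem pv_normalize_eq (keyword : String) :
    pvNormalize keyword = PySem.Chars.join [' '] (pvTokensB keyword) := rfl

-- ===== VERDICT (by name: the statement is the Claim_ definition above) =====
theorem match_flight_gateway_alias_py_spec : Claim_equal_match_flight_gateway_alias_py := by
  intro keyword _
  unfold Spec_match_flight_gateway_alias_py
  rw [pv_alt_eq]
  unfold match_flight_gateway_alias_py
  have hw : ∀ w ∈ pvTokensB keyword, pvWord w := pv_split₀_words _
  rw [pv_normalize_eq]
  exact pv_main (pvTokensB keyword) hw
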